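-- pv_equiv track=rewrite | github.com/TheAlgorithm-SimpleChinese/Python | Pythontip算法题/中等/小Py的计算器.py | N_add
-- ===== SOURCE A (Python) =====
-- S = 'abcdefghijklmnopqrstuvwxyz'
--
-- def N_add(s1, s2):
--     l = max(len(s1), len(s2))
--     s1 = s1.rjust(l, 'a')
--     s2 = s2.rjust(l, 'a')
--     R = ''
--     jinwei = 0
--     for i in range(l - 1, -1, -1):
--         tmp = S.index(s1[i]) + S.index(s2[i]) + jinwei
--         if tmp >= 26:
--             tmp = tmp - 26
--             jinwei = 1
--         else:
--             jinwei = 0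
--         R = S[tmp] + R
--     if jinwei == 1:
--         return 'b' + R
--     else:
--         return R
-- ===== SOURCE B (Python) =====
-- S = 'abcdefghijklmnopqrstuvwxyz'
--
-- def N_add(s1, s2):
--     def decode(s):
--         n = 0
--         for c in s:
--             n = n * 26 + S.index(c)
--         return n
--     total = decode(s1) + decode(s2)
--     R = ''
--     while total:
--         R = S[total % 26] + R
--         total //= 26
--     return R.rjust(max(len(s1), len(s2)), 'a')
-- ===== Notes on version B (the rewrite author's own statement) =====
-- stated objective: simpler
-- what changed: B replaces A's digit-by-digit ripple-carry loop over right-justified strings by decoding both strings to integers with Horner's rule, adding once, and re-encoding the sum to base-26 letters with left padding.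
import Mathlib
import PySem

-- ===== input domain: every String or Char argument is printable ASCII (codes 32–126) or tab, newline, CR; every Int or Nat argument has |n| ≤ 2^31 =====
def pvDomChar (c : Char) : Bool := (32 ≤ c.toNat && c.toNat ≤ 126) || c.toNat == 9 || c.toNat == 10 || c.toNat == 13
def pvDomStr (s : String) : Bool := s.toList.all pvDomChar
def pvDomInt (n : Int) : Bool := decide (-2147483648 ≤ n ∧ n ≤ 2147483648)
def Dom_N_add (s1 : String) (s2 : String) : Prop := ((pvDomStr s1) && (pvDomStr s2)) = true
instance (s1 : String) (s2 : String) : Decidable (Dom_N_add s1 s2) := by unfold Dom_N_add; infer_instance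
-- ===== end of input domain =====

-- B replaces A's digitwise ripple-carry loop by decode-to-integer (Horner), one addition, and
-- re-encode to base-26 letters with left padding; objective: simpler. Return values agree on Pre_.

-- ===== PORT A =====
-- S = 'abcdefghijklmnopqrstuvwxyz'
def pvS : List Char :=
  ['a','b','c','d','e','f','g','h','i','j','k','l','m','n','o','p','q','r','s','t','u','v','w','x','y','z']

-- S.index(c); exact on Pre_ (Python raises ValueError on characters not in S, excluded by Pre_)
def pvIdx (c : Char) : Nat := pvS.findIdx (· = c)

-- the loop 'for i in range(l-1,-1,-1)' as the obvious structural recursion: the carry (jinwei)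
-- flows from the last index pair to the first, R is built by prepending S[tmp].
-- S[tmp] is ported as getD; exact on Pre_, where tmp (resp. tmp-26) is always < 26.
def pvAGo : List Char → List Char → Nat × List Char
  | c1 :: r1, c2 :: r2 =>
      let p := pvAGo r1 r2
      let tmp := pvIdx c1 + pvIdx c2 + p.1
      if tmp ≥ 26 then (1, pvS.getD (tmp - 26) 'a' :: p.2)
      else (0, pvS.getD tmp 'a' :: p.2)
  | _, _ => (0, [])

def N_add (s1 : String) (s2 : String) : String :=
  let t1 := s1.toList
  let t2 := s2.toList
  let l := max t1.length t2.length
  let p1 := List.replicate (l - t1.length) 'a' ++ t1   -- s1.rjust(l, 'a')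
  let p2 := List.replicate (l - t2.length) 'a' ++ t2   -- s2.rjust(l, 'a')
  let r := pvAGo p1 p2
  if r.1 = 1 then String.mk ('b' :: r.2) else String.mk r.2

-- ===== PORT B =====
-- decode(s): Horner, n = n*26 + S.index(c)
def pvDec (t : List Char) : Nat := t.foldl (fun n c => n * 26 + pvIdx c) 0

-- the 'while total:' loop: prepend S[total % 26], total //= 26 (total ≥ 0, so Nat div/mod are exact)
def pvEnc : Nat → List Char → List Char
  | 0, acc => acc
  | n + 1, acc => pvEnc ((n + 1) / 26) (pvS.getD ((n + 1) % 26) 'a' :: acc)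
  termination_by n _ => n
  decreasing_by exact Nat.div_lt_self (Nat.succ_pos n) (by norm_num)

def N_add_alt (s1 : String) (s2 : String) : String :=
  let t1 := s1.toList
  let t2 := s2.toList
  let total := pvDec t1 + pvDec t2
  let R := pvEnc total []
  -- R.rjust(max(len(s1), len(s2)), 'a')
  String.mk (List.replicate (max t1.length t2.length - R.length) 'a' ++ R)

-- ===== PRECONDITION & SPEC =====
-- Pre_ excludes exactly the inputs on which Python A raises ValueError (a character outside
-- 'a'..'z', hit by S.index); B raises the same ValueError there.
def Pre_N_add (s1 : String) (s2 : String) : Prop :=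
  (s1.toList.all (fun c => pvS.contains c) && s2.toList.all (fun c => pvS.contains c)) = true
instance (s1 : String) (s2 : String) : Decidable (Pre_N_add s1 s2) := by
  unfold Pre_N_add; infer_instance

def pvWitness_N_add : String × String := ("ab", "zz")

def Spec_N_add (s1 : String) (s2 : String) (out : String) : Prop := out = N_add_alt s1 s2
instance (s1 : String) (s2 : String) (out : String) : Decidable (Spec_N_add s1 s2 out) := by
  unfold Spec_N_add; infer_instance

-- ===== CLAIM (what is proved, stated in full; the proofs are below) =====
def Claim_equal_N_add : Prop := ∀ (s1 : String) (s2 : String), Dom_N_add s1 s2 → Pre_N_add s1 s2 → Spec_N_add s1 s2 (N_add s1 s2)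

-- ===== LEMMAS AND PROOFS =====

-- the fixed-width (l digits, most significant first) base-26 rendering of n
def pvFix : Nat → Nat → List Char
  | 0, _ => []
  | l + 1, n => pvFix l (n / 26) ++ [pvS.getD (n % 26) 'a']

theorem pvIdx_lt (c : Char) (h : c ∈ pvS) : pvIdx c < 26 := by
  have : pvS.findIdx (· = c) < pvS.length := by
    apply List.findIdx_lt_length.mpr
    exact ⟨c, h, by simp⟩
  simpa [pvIdx, pvS] using this

theorem pvDec_foldl (t : List Char) (a : Nat) :
    t.foldl (fun n c => n * 26 + pvIdx c) a
      = a * 26 ^ t.length + t.foldl (fun n c => n * 26 + pvIdx c) 0 := by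
  induction t generalizing a with
  | nil => simp
  | cons c r ih =>
    simp only [List.foldl_cons, List.length_cons]
    rw [ih (a * 26 + pvIdx c), ih (0 * 26 + pvIdx c)]
    ring

theorem pvDec_cons (c : Char) (r : List Char) :
    pvDec (c :: r) = pvIdx c * 26 ^ r.length + pvDec r := by
  simp only [pvDec, List.foldl_cons]
  rw [pvDec_foldl]
  ring

theorem pvDec_lt (t : List Char) (h : ∀ c ∈ t, c ∈ pvS) : pvDec t < 26 ^ t.length := by
  induction t with
  | nil => simp [pvDec]
  | cons c r ih =>
    have hc : pvIdx c < 26 := pvIdx_lt c (h c (by simp))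
    have hr : pvDec r < 26 ^ r.length := ih (fun x hx => h x (by simp [hx]))
    rw [pvDec_cons]
    calc pvIdx c * 26 ^ r.length + pvDec r
        < pvIdx c * 26 ^ r.length + 26 ^ r.length := by omega
      _ = (pvIdx c + 1) * 26 ^ r.length := by ring
      _ ≤ 26 * 26 ^ r.length := Nat.mul_le_mul_right _ (by omega)
      _ = 26 ^ (c :: r).length := by rw [List.length_cons, pow_succ]; ring

theorem pvDec_pad (k : Nat) (t : List Char) :
    pvDec (List.replicate k 'a' ++ t) = pvDec t := by
  induction k with
  | zero => simp
  | succ k ih =>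
    have ha : pvIdx 'a' = 0 := by decide
    simpa [pvDec, List.replicate_succ, List.foldl_cons, ha] using ih

theorem pvFix_zero (l : Nat) : pvFix l 0 = List.replicate l 'a' := by
  induction l with
  | zero => rfl
  | succ l ih =>
    show pvFix l (0 / 26) ++ [pvS.getD (0 % 26) 'a'] = _
    rw [Nat.zero_div, ih]
    have h0 : pvS.getD (0 % 26) 'a' = 'a' := by decide
    rw [h0, List.replicate_succ']

theorem pvFix_cons (l n : Nat) :
    pvFix (l + 1) n = pvS.getD (n / 26 ^ l % 26) 'a' :: pvFix l (n % 26 ^ l) := by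
  induction l generalizing n with
  | zero => simp [pvFix]
  | succ l ih =>
    show pvFix (l + 1) (n / 26) ++ [pvS.getD (n % 26) 'a'] = _
    rw [ih (n / 26)]
    have h1 : n / 26 / 26 ^ l = n / 26 ^ (l + 1) := by
      rw [Nat.div_div_eq_div_mul, pow_succ, mul_comm]
    have h2 : n / 26 % 26 ^ l = n % 26 ^ (l + 1) / 26 := by
      have h := Nat.mod_mul_right_div_self n 26 (26 ^ l)
      rw [pow_succ, mul_comm]
      omega
    have h3 : n % 26 ^ (l + 1) % 26 = n % 26 := by
      apply Nat.mod_mod_of_dvd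
      exact dvd_pow_self 26 (Nat.succ_ne_zero l)
    rw [h1]
    show _ :: (pvFix l (n / 26 % 26 ^ l) ++ [pvS.getD (n % 26) 'a']) = _
    congr 1
    rw [h2, ← h3]
    rfl

theorem pvAGo_spec (t1 t2 : List Char) (hl : t1.length = t2.length)
    (h1 : ∀ c ∈ t1, c ∈ pvS) (h2 : ∀ c ∈ t2, c ∈ pvS) :
    pvAGo t1 t2 = ((pvDec t1 + pvDec t2) / 26 ^ t1.length,
                   pvFix t1.length ((pvDec t1 + pvDec t2) % 26 ^ t1.length)) := by
  induction t1 generalizing t2 with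
  | nil =>
    cases t2 with
    | nil => simp [pvAGo, pvDec, pvFix]
    | cons c r => simp at hl
  | cons c1 r1 ih =>
    cases t2 with
    | nil => simp at hl
    | cons c2 r2 =>
      have hl' : r1.length = r2.length := by simpa using hl
      have hr1 : ∀ c ∈ r1, c ∈ pvS := fun x hx => h1 x (by simp [hx])
      have hr2 : ∀ c ∈ r2, c ∈ pvS := fun x hx => h2 x (by simp [hx])
      have hi1 : pvIdx c1 < 26 := pvIdx_lt c1 (h1 c1 (by simp))
      have hi2 : pvIdx c2 < 26 := pvIdx_lt c2 (h2 c2 (by simp))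
      have hb1 : pvDec r1 < 26 ^ r1.length := pvDec_lt r1 hr1
      have hb2 : pvDec r2 < 26 ^ r2.length := pvDec_lt r2 hr2
      set k := r1.length with hk
      have hb2' : pvDec r2 < 26 ^ k := by rw [hl']; exact hb2
      set Nr := pvDec r1 + pvDec r2 with hNr
      have hNrlt : Nr < 2 * 26 ^ k := by omega
      have hd1 : pvDec (c1 :: r1) = pvIdx c1 * 26 ^ k + pvDec r1 := pvDec_cons c1 r1
      have hd2 : pvDec (c2 :: r2) = pvIdx c2 * 26 ^ k + pvDec r2 := by
        rw [pvDec_cons, ← hl']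
      set N := pvDec (c1 :: r1) + pvDec (c2 :: r2) with hN
      have hNeq : N = (pvIdx c1 + pvIdx c2) * 26 ^ k + Nr := by rw [hN, hd1, hd2, hNr]; ring
      have hpow : (0:Nat) < 26 ^ k := pow_pos (by norm_num) k
      -- division facts
      have hdiv : N / 26 ^ k = pvIdx c1 + pvIdx c2 + Nr / 26 ^ k := by
        rw [hNeq, add_comm, Nat.add_mul_div_right _ _ hpow]; ring
      have hmod : N % 26 ^ k = Nr % 26 ^ k := by
        rw [hNeq, add_comm, Nat.add_mul_mod_self_right]
      have hcarry : Nr / 26 ^ k ≤ 1 := by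
        have h2 : Nr / 26 ^ k < 2 := Nat.div_lt_of_lt_mul (by omega)
        omega
      set tmp := pvIdx c1 + pvIdx c2 + Nr / 26 ^ k with htmp
      have htmplt : tmp < 52 := by omega
      have hNk1div : N / 26 ^ (k + 1) = tmp / 26 := by
        rw [pow_succ, ← Nat.div_div_eq_div_mul, hdiv]
      have hNk1mod : N % 26 ^ (k + 1) % 26 ^ k = N % 26 ^ k := by
        apply Nat.mod_mod_of_dvd
        exact pow_dvd_pow 26 (Nat.le_succ k)
      have hNk1div2 : N % 26 ^ (k + 1) / 26 ^ k % 26 = tmp % 26 := by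
        have h := Nat.mod_mul_right_div_self N (26 ^ k) 26
        have hp : 26 ^ (k + 1) = 26 ^ k * 26 := pow_succ 26 k
        rw [hp, h, Nat.mod_mod_of_dvd _ dvd_rfl, hdiv]
      -- unfold one step of pvAGo
      show (let p := pvAGo r1 r2;
        let tmp' := pvIdx c1 + pvIdx c2 + p.1;
        if tmp' ≥ 26 then (1, pvS.getD (tmp' - 26) 'a' :: p.2)
        else (0, pvS.getD tmp' 'a' :: p.2)) = _
      rw [ih r2 hl' hr1 hr2]
      simp only [← hNr, ← htmp]
      have hlen : (c1 :: r1).length = k + 1 := by simp [hk]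
      rw [hlen]
      rw [pvFix_cons k (N % 26 ^ (k+1)), hNk1div2, hNk1mod, hmod]
      by_cases hge : tmp ≥ 26
      · have e1 : tmp / 26 = 1 := Nat.div_eq_of_lt_le (by omega) (by omega)
        have e2 : tmp % 26 = tmp - 26 := by
          rw [Nat.mod_eq_sub_mod hge]
          exact Nat.mod_eq_of_lt (by omega)
        simp [hge, hNk1div, e1, e2]
      · have hlt : tmp < 26 := by omega
        have e1 : tmp / 26 = 0 := Nat.div_eq_of_lt hlt
        have e2 : tmp % 26 = tmp := Nat.mod_eq_of_lt hlt
        simp [hge, hNk1div, e1, e2]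

theorem pvEnc_append (n : Nat) (acc : List Char) : pvEnc n acc = pvEnc n [] ++ acc := by
  induction n using Nat.strong_induction_on generalizing acc with
  | _ n ih =>
    cases n with
    | zero => simp [pvEnc]
    | succ m =>
      have hlt : (m + 1) / 26 < m + 1 := Nat.div_lt_self (Nat.succ_pos m) (by norm_num)
      rw [pvEnc, pvEnc, ih _ hlt (pvS.getD ((m+1) % 26) 'a' :: acc),
        ih _ hlt (pvS.getD ((m+1) % 26) 'a' :: [])]
      simp

theorem pvEnc_fix (l : Nat) : ∀ n, n < 26 ^ l →
    List.replicate (l - (pvEnc n []).length) 'a' ++ pvEnc n [] = pvFix l n := by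
  induction l with
  | zero =>
    intro n hn
    interval_cases n
    simp [pvEnc, pvFix]
  | succ l ih =>
    intro n hn
    cases n with
    | zero =>
      rw [show pvEnc 0 [] = [] from by rw [pvEnc], pvFix_zero]; simp
    | succ m =>
      have hstep : pvEnc (m + 1) [] = pvEnc ((m+1)/26) [] ++ [pvS.getD ((m+1) % 26) 'a'] := by
        rw [pvEnc, pvEnc_append]
      have hdivlt : (m + 1) / 26 < 26 ^ l := by
        apply Nat.div_lt_of_lt_mul
        rw [mul_comm, ← pow_succ]
        exact hn
      have ihd := ih ((m+1)/26) hdivlt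
      show _ = pvFix l ((m+1)/26) ++ [pvS.getD ((m+1) % 26) 'a']
      rw [hstep, ← ihd]
      simp only [List.length_append, List.length_cons, List.length_nil]
      have : l + 1 - ((pvEnc ((m+1)/26) []).length + 1) = l - (pvEnc ((m+1)/26) []).length := by
        omega
      rw [this, List.append_assoc]

theorem pvPad_mem (k : Nat) (t : List Char) (h : ∀ c ∈ t, c ∈ pvS) :
    ∀ c ∈ List.replicate k 'a' ++ t, c ∈ pvS := by
  intro c hc
  rcases List.mem_append.mp hc with h1 | h2
  · have := List.eq_of_mem_replicate h1
    subst this; decide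
  · exact h c h2

-- ===== VERDICT (by name: the statement is the Claim_ definition above) =====
theorem N_add_spec : Claim_equal_N_add := by
  intro s1 s2 _ hpre
  simp only [Pre_N_add, Bool.and_eq_true, List.all_eq_true, List.contains_iff_mem] at hpre
  obtain ⟨h1, h2⟩ := hpre
  unfold Spec_N_add N_add N_add_alt
  dsimp only
  set t1 := s1.toList with ht1
  set t2 := s2.toList with ht2
  set l := max t1.length t2.length with hldef
  set p1 := List.replicate (l - t1.length) 'a' ++ t1 with hp1
  set p2 := List.replicate (l - t2.length) 'a' ++ t2 with hp2
  have hl1 : p1.length = l := by simp [hp1]; omega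
  have hl2 : p2.length = l := by simp [hp2]; omega
  have hm1 : ∀ c ∈ p1, c ∈ pvS := pvPad_mem _ _ h1
  have hm2 : ∀ c ∈ p2, c ∈ pvS := pvPad_mem _ _ h2
  have hNpad : pvDec p1 + pvDec p2 = pvDec t1 + pvDec t2 := by
    rw [hp1, hp2, pvDec_pad, pvDec_pad]
  set N := pvDec t1 + pvDec t2 with hNdef
  have hago : pvAGo p1 p2 = (N / 26 ^ l, pvFix l (N % 26 ^ l)) := by
    have := pvAGo_spec p1 p2 (by rw [hl1, hl2]) hm1 hm2
    rwa [hl1, hNpad] at this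
  have hb1 : pvDec p1 < 26 ^ l := by have := pvDec_lt p1 hm1; rwa [hl1] at this
  have hb2 : pvDec p2 < 26 ^ l := by have := pvDec_lt p2 hm2; rwa [hl2] at this
  have hNlt : N < 2 * 26 ^ l := by omega
  have hpow : (0:Nat) < 26 ^ l := pow_pos (by norm_num) l
  rw [hago]
  by_cases hc : N < 26 ^ l
  · have hd0 : N / 26 ^ l = 0 := Nat.div_eq_of_lt hc
    have hmod : N % 26 ^ l = N := Nat.mod_eq_of_lt hc
    rw [hd0, hmod]
    simp only [if_neg (by omega : ¬ (0 = 1))]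
    rw [← pvEnc_fix l N hc]
  · replace hc : 26 ^ l ≤ N := Nat.le_of_not_lt hc
    have hd1 : N / 26 ^ l = 1 := by
      have hq2 : N / 26 ^ l < 2 := Nat.div_lt_of_lt_mul (by omega)
      have hq1 : 1 ≤ N / 26 ^ l := (Nat.one_le_div_iff hpow).mpr hc
      omega
    have hlt1 : N < 26 ^ (l + 1) := by
      have : (2:Nat) * 26 ^ l ≤ 26 ^ (l + 1) := by
        rw [pow_succ]
        have := hpow
        nlinarith
      omega
    have hfix := pvEnc_fix (l + 1) N hlt1
    have hcons : pvFix (l + 1) N = 'b' :: pvFix l (N % 26 ^ l) := by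
      rw [pvFix_cons, hd1]
      norm_num
      decide
    -- the encoding has exactly l+1 characters: otherwise its padded form starts with 'a' ≠ 'b'
    have hlen : l + 1 ≤ (pvEnc N []).length := by
      by_contra hle
      have : l + 1 - (pvEnc N []).length = (l - (pvEnc N []).length) + 1 := by omega
      rw [this, List.replicate_succ, hcons] at hfix
      simp at hfix
    have hz : l + 1 - (pvEnc N []).length = 0 := by omega
    have hz' : l - (pvEnc N []).length = 0 := by omega
    rw [hz] at hfix
    simp only [List.replicate_zero, List.nil_append] at hfix
    rw [hd1, if_pos rfl, hz']
    simp only [List.replicate_zero, List.nil_append]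
    rw [hfix, hcons]
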